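-- pv_equiv track=rewrite | github.com/iaalm/neuraltalk2-SCST | bleu.py | count_ngram
-- ===== SOURCE A (Python) =====
-- def count_ngram(w, sent):
--     if type(sent[0]) != list:
--         sent = [sent]
--     res = 0
--     l = len(w)
--     for s in sent:
--         count = 0
--         for i in range(len(s) - l + 1):
--             if w == s[i:i+l]:
--                 count = count + 1
--         res = max(count, res)
--     return res
-- ===== SOURCE B (Python) =====
-- def count_ngram(w, sent):
--     # Shift-And (bitap) bit-parallel matcher: state bit k says "w[:k+1] is a
--     # suffix of the tokens read so far"; a set top bit is one (overlapping) match.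
--     if sent and not isinstance(sent[0], list):
--         sent = [sent]
--     l = len(w)
--     if l == 0:
--         return max(len(s) + 1 for s in sent)
--     masks = {}
--     for k, tok in enumerate(w):
--         masks[tok] = masks.get(tok, 0) | (1 << k)
--     top = 1 << (l - 1)
--     best = 0
--     for s in sent:
--         state = 0
--         count = 0
--         for tok in s:
--             state = ((state << 1) | 1) & masks.get(tok, 0)
--             if state & top:
--                 count += 1
--         best = max(best, count)
--     return best
-- ===== Notes on version B (the rewrite author's own statement) =====
-- stated objective: alternative
-- what changed: B replaces A's slice-and-compare at every window position with the Shift-And (bitap) bit-parallel matcher: a precomputed per-token bitmask table and one shift/or/and automaton step per token, counting overlapping matches when the top bit fires; no list slice is ever built.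
import Mathlib
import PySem

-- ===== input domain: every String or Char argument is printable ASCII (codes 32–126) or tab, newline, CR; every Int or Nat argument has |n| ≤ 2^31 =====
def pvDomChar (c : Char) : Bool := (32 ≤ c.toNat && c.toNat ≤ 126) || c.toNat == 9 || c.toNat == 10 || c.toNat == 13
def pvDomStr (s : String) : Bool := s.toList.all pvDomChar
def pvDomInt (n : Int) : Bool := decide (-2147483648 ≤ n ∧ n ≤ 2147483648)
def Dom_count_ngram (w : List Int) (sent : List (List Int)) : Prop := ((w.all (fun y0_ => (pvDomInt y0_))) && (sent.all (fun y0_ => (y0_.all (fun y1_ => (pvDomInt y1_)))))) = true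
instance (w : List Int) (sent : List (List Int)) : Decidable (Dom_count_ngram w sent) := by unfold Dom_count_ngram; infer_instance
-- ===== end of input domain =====

-- B replaces A's per-position list-slice comparison with the Shift-And (bitap) bit-parallel
-- matcher: a bitmask automaton over each sentence counting overlapping matches (alternative algorithm).


-- ===== PORT A =====
-- `type(sent[0]) != list` is always False at type List (List Int); `sent[0]` raises IndexError on sent = [] (excluded by Pre_)
def count_ngram (w : List Int) (sent : List (List Int)) : Int :=
  let l : Int := w.length
  sent.foldl (fun res s =>
    let count : Int := (PySem.List.pyRange 0 ((s.length : Int) - l + 1) 1).foldl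
      (fun count i => if w = PySem.List.slice s (some i) (some (i + l)) then count + 1 else count) 0
    max count res) 0

-- ===== PORT B =====
-- Python's bitmasks here are always nonnegative ints, so Nat bit operations are exact.
-- masks[tok] : bit k set iff w[k] == tok (the enumerate index k is nonnegative, so .toNat is exact)
def pvMasksB (w : List Int) : PySem.Dict Int Nat :=
  (PySem.List.enumerate w).foldl
    (fun d p => d.insert p.2 (d.getD p.2 0 ||| (1 <<< p.1.toNat))) PySem.Dict.empty

-- loop body of B's per-token step: state' = ((state << 1) | 1) & masks.get(tok, 0); count += (state' & top) != 0
def pvStepB (masks : PySem.Dict Int Nat) (top : Nat) (p : Int × Nat) (tok : Int) : Int × Nat :=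
  let state := ((p.2 <<< 1) ||| 1) &&& masks.getD tok 0
  (if state &&& top ≠ 0 then p.1 + 1 else p.1, state)

-- `max(len(s) + 1 for s in sent)` on the nonempty sent admitted by Pre_ (Python raises ValueError on an
-- empty one); ported as the fold Python's max performs on a nonempty sequence, [] case unreachable.
def count_ngram_alt (w : List Int) (sent : List (List Int)) : Int :=
  let l := w.length
  if l = 0 then
    match sent.map (fun s => (s.length : Int) + 1) with
    | [] => 0
    | x :: xs => xs.foldl max x
  else
    let masks := pvMasksB w
    let top : Nat := 1 <<< (l - 1)
    sent.foldl (fun best s => max best (s.foldl (pvStepB masks top) (0, 0)).1) 0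

-- ===== PRECONDITION & SPEC =====
-- A evaluates sent[0], which raises IndexError on sent = []; that is the only exception A can raise here.
def Pre_count_ngram (w : List Int) (sent : List (List Int)) : Prop := sent ≠ []
instance (w : List Int) (sent : List (List Int)) : Decidable (Pre_count_ngram w sent) := by unfold Pre_count_ngram; infer_instance
def pvWitness_count_ngram : List Int × List (List Int) := ([1, 2], [[1, 2, 1, 2], [3]])

def Spec_count_ngram (w : List Int) (sent : List (List Int)) (out : Int) : Prop := out = count_ngram_alt w sent
instance (w : List Int) (sent : List (List Int)) (out : Int) : Decidable (Spec_count_ngram w sent out) := by unfold Spec_count_ngram; infer_instance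

-- ===== CLAIM (what is proved, stated in full; the proofs are below) =====
def Claim_equal_count_ngram : Prop := ∀ (w : List Int) (sent : List (List Int)), Dom_count_ngram w sent → Pre_count_ngram w sent → Spec_count_ngram w sent (count_ngram w sent)

-- ===== LEMMAS AND PROOFS =====

-- the number of (overlapping) occurrences of w ending inside t, after already-read prefix u
def occAux (w u t : List Int) : Int :=
  match t with
  | [] => 0
  | a :: t' => ((if w <:+ u ++ [a] then 1 else 0) + occAux w (u ++ [a]) t' : Int)

theorem suffix_append_singleton_iff (xs u : List Int) (a b : Int) :
    xs ++ [a] <:+ u ++ [b] ↔ a = b ∧ xs <:+ u := by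
  constructor
  · intro h
    have h' : (xs ++ [a]).reverse <+: (u ++ [b]).reverse := List.reverse_prefix.mpr h
    simp only [List.reverse_append, List.reverse_singleton, List.singleton_append,
      List.cons_prefix_cons] at h'
    exact ⟨h'.1, List.reverse_prefix.mp h'.2⟩
  · rintro ⟨rfl, ⟨v, rfl⟩⟩
    exact ⟨v, by simp⟩

theorem testBit_one' (k : Nat) : (1 : Nat).testBit k = decide (k = 0) := by
  cases k <;> simp [Nat.testBit_succ]

theorem and_two_pow_ne_zero (x m : Nat) : (x &&& 2 ^ m ≠ 0) ↔ x.testBit m = true := by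
  rw [Nat.and_two_pow]
  by_cases h : x.testBit m <;> simp [h]

-- bit k of pvMasksB w at tok ↔ w[k] == tok
theorem masksB_fold_bit (ws : List Int) (s0 : Int) (hs0 : 0 ≤ s0) (d : PySem.Dict Int Nat)
    (tok : Int) (k : Nat) :
    (((PySem.List.enumerate ws s0).foldl
        (fun d p => d.insert p.2 (d.getD p.2 0 ||| (1 <<< p.1.toNat))) d).getD tok 0).testBit k
      = ((d.getD tok 0).testBit k || decide (s0.toNat ≤ k ∧ ws[k - s0.toNat]? = some tok)) := by
  induction ws generalizing s0 d with
  | nil => simp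
  | cons a ws ih =>
    rw [PySem.List.enumerate_cons, List.foldl_cons, ih (s0 + 1) (by omega)]
    have hst : (s0 + 1).toNat = s0.toNat + 1 := by omega
    by_cases htok : tok = a
    · subst htok
      rw [PySem.Dict.getD_insert_self]
      rw [Nat.testBit_or, Nat.one_shiftLeft, Nat.testBit_two_pow]
      by_cases hk : k = s0.toNat
      · subst hk; simp [hst]
      · rcases Nat.lt_or_ge k s0.toNat with h | h
        · simp only [hst]
          have h1 : ¬ (s0.toNat ≤ k) := by omega
          have h2 : ¬ (s0.toNat + 1 ≤ k) := by omega
          have h3 : s0.toNat ≠ k := by omega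
          simp [h1, h2, h3]
        · have hk1 : s0.toNat + 1 ≤ k := by omega
          have : k - s0.toNat = (k - (s0.toNat + 1)) + 1 := by omega
          have h3 : s0.toNat ≠ k := by omega
          simp [hst, hk1, (by omega : s0.toNat ≤ k), this, h3]
    · rw [PySem.Dict.getD_insert_of_ne _ _ _ htok]
      by_cases h : s0.toNat ≤ k
      · by_cases hk : k = s0.toNat
        · subst hk
          simp [hst, Ne.symm htok]
        · have : k - s0.toNat = (k - (s0.toNat + 1)) + 1 := by omega
          simp [hst, h, (by omega : s0.toNat + 1 ≤ k), this]
      · simp only [hst]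
        simp [h]
        exact fun h1 _ => absurd h1 (by omega)

theorem masksB_bit (w : List Int) (tok : Int) (k : Nat) :
    ((pvMasksB w).getD tok 0).testBit k = decide (w[k]? = some tok) := by
  unfold pvMasksB
  rw [masksB_fold_bit w 0 le_rfl]
  simp

-- the automaton-state invariant: bit k set ↔ w[:k+1] is a suffix of the tokens read so far
def pvInv (w : List Int) (st : Nat) (u : List Int) : Prop :=
  ∀ k : Nat, st.testBit k = decide (k < w.length ∧ w.take (k + 1) <:+ u)

theorem stepB_state (w : List Int) (u : List Int) (tok : Int) (st : Nat) (hst : pvInv w st u) :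
    pvInv w (((st <<< 1) ||| 1) &&& (pvMasksB w).getD tok 0) (u ++ [tok]) := by
  intro k
  rw [Nat.testBit_and, Nat.testBit_or, Nat.testBit_shiftLeft, testBit_one', masksB_bit, hst]
  rw [Bool.eq_iff_iff]
  simp only [Bool.and_eq_true, Bool.or_eq_true, decide_eq_true_eq, ge_iff_le]
  by_cases hk : k < w.length
  · have hget : w[k]? = some w[k] := List.getElem?_eq_getElem hk
    have htake : w.take (k + 1) = w.take k ++ [w[k]] := by
      rw [List.take_add_one, hget]; rfl
    rw [htake, suffix_append_singleton_iff]
    cases k with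
    | zero => simp [hk, eq_comm]
    | succ k' =>
      rw [hget]
      have h1 : (1 : Nat) ≤ k' + 1 := by omega
      have h2 : k' + 1 - 1 = k' := by omega
      rw [h2]
      constructor
      · rintro ⟨h3, h4⟩
        have h4' : w[k' + 1] = tok := by injection h4
        rcases h3 with ⟨_, _, h5⟩ | h6
        · exact ⟨hk, h4', h5⟩
        · omega
      · rintro ⟨_, h3, h4⟩
        exact ⟨Or.inl ⟨h1, by omega, h4⟩, by rw [h3]⟩
  · have hget : w[k]? = none := List.getElem?_eq_none (by omega)
    simp [hk]

theorem stepB_count (w : List Int) (hw : w ≠ []) (masks : PySem.Dict Int Nat)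
    (hmasks : masks = pvMasksB w) (u : List Int) (tok : Int) (c : Int) (st : Nat)
    (hst : pvInv w st u) :
    (pvStepB masks (1 <<< (w.length - 1)) (c, st) tok).1
      = c + (if w <:+ u ++ [tok] then 1 else 0) := by
  subst hmasks
  have hinv := stepB_state w u tok st hst
  unfold pvStepB
  have hl : 0 < w.length := List.length_pos_iff.mpr hw
  rw [Nat.one_shiftLeft]
  simp only
  have htk : w.take (w.length - 1 + 1) = w := by
    rw [(by omega : w.length - 1 + 1 = w.length), List.take_length]
  have hbit : (((st <<< 1 ||| 1) &&& (pvMasksB w).getD tok 0) &&& 2 ^ (w.length - 1) ≠ 0)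
      ↔ (w <:+ u ++ [tok]) := by
    rw [and_two_pow_ne_zero, hinv (w.length - 1)]
    simp only [decide_eq_true_eq, htk, (by omega : w.length - 1 < w.length), true_and]
  by_cases h : w <:+ u ++ [tok]
  · rw [if_pos (hbit.mpr h), if_pos h]
  · rw [if_neg (fun hc => h (hbit.mp hc)), if_neg h]
    ring

theorem loopB_count (w : List Int) (hw : w ≠ []) (t : List Int) :
    ∀ (u : List Int) (c : Int) (st : Nat), pvInv w st u →
    (t.foldl (pvStepB (pvMasksB w) (1 <<< (w.length - 1))) (c, st)).1 = c + occAux w u t := by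
  induction t with
  | nil => intro u c st _; simp [occAux]
  | cons a t' ih =>
    intro u c st hst
    rw [List.foldl_cons]
    have hstep : pvStepB (pvMasksB w) (1 <<< (w.length - 1)) (c, st) a
        = ((pvStepB (pvMasksB w) (1 <<< (w.length - 1)) (c, st) a).1,
           ((st <<< 1) ||| 1) &&& (pvMasksB w).getD a 0) := by
      unfold pvStepB; simp
    rw [hstep, ih (u ++ [a]) _ _ (stepB_state w u a st hst),
      stepB_count w hw _ rfl u a c st hst]
    have hocc : occAux w u (a :: t') = (if w <:+ u ++ [a] then 1 else 0) + occAux w (u ++ [a]) t' := rfl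
    rw [hocc]
    ring

-- occAux as a countP over end positions
theorem occAux_countP (w : List Int) (t : List Int) :
    ∀ u : List Int, occAux w u t
      = ((List.range t.length).countP (fun j => decide (w <:+ u ++ t.take (j + 1))) : Int) := by
  induction t with
  | nil => intro u; simp [occAux]
  | cons a t' ih =>
    intro u
    unfold occAux
    rw [ih (u ++ [a])]
    rw [List.length_cons, List.range_succ_eq_map, List.countP_cons, List.countP_map]
    have : ∀ j : Nat, (u ++ [a]) ++ t'.take (j + 1) = u ++ (a :: t').take (j + 1 + 1) := by
      intro j; simp
    simp only [Function.comp_def, Nat.succ_eq_add_one, this]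
    push_cast
    by_cases h : w <:+ u ++ [a]
    · simp [h, List.take_add_one]
      ring
    · simp [h, List.take_add_one]

-- the suffix-at-end-position predicate is the window predicate
theorem suffix_take_iff_window (w s : List Int) (j : Nat) (hj : j < s.length) :
    (w <:+ s.take (j + 1)) ↔ (w.length ≤ j + 1 ∧ w = (s.drop (j + 1 - w.length)).take w.length) := by
  have hlen : (s.take (j + 1)).length = j + 1 := by
    rw [List.length_take]; omega
  constructor
  · intro h
    have hle : w.length ≤ j + 1 := by
      have := List.IsSuffix.length_le h; omega
    have h2 := List.suffix_iff_eq_drop.mp h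
    rw [hlen, List.drop_take, (by omega : j + 1 - (j + 1 - w.length) = w.length)] at h2
    exact ⟨hle, h2⟩
  · rintro ⟨hle, heq⟩
    rw [List.suffix_iff_eq_drop, hlen, List.drop_take,
      (by omega : j + 1 - (j + 1 - w.length) = w.length)]
    exact heq

-- reindexing: counting matching windows = counting match end positions
theorem countP_window_reindex (w s : List Int) (hw : w ≠ []) :
    List.countP (fun y : Nat => decide (w = (s.drop y).take w.length))
        (List.range ((s.length : Int) - (w.length : Int) + 1).toNat)
      = List.countP (fun j : Nat => decide (w <:+ s.take (j + 1))) (List.range s.length) := by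
  have hl : 1 ≤ w.length := List.length_pos_iff.mpr hw
  have hrhs : List.countP (fun j : Nat => decide (w <:+ s.take (j + 1))) (List.range s.length)
      = List.countP (fun j : Nat =>
          decide (w.length ≤ j + 1 ∧ w = (s.drop (j + 1 - w.length)).take w.length))
          (List.range s.length) := by
    apply List.countP_congr
    intro j hjmem
    have hj : j < s.length := List.mem_range.mp hjmem
    simp only [decide_eq_true_eq]
    exact suffix_take_iff_window w s j hj
  rw [hrhs]
  by_cases hn : w.length ≤ s.length + 1
  · have hm : ((s.length : Int) - (w.length : Int) + 1).toNat = s.length + 1 - w.length := by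
      omega
    have hsplit : s.length = (w.length - 1) + (s.length + 1 - w.length) := by omega
    rw [hm]
    conv_rhs => rw [hsplit, List.range_add, List.countP_append, List.countP_map]
    have hzero : List.countP (fun j : Nat =>
        decide (w.length ≤ j + 1 ∧ w = (s.drop (j + 1 - w.length)).take w.length))
        (List.range (w.length - 1)) = 0 := by
      rw [List.countP_eq_zero]
      intro j hjmem
      have hj : j < w.length - 1 := List.mem_range.mp hjmem
      simp only [decide_eq_true_eq, not_and]
      intro hcon
      omega
    rw [hzero, zero_add]
    apply List.countP_congr
    intro k _
    simp only [Function.comp_apply, decide_eq_true_eq]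
    constructor
    · intro h
      exact ⟨by omega, by rw [(by omega : w.length - 1 + k + 1 - w.length = k)]; exact h⟩
    · rintro ⟨_, h⟩
      rw [(by omega : w.length - 1 + k + 1 - w.length = k)] at h
      exact h
  · have hm : ((s.length : Int) - (w.length : Int) + 1).toNat = 0 := by omega
    rw [hm]
    rw [List.range_zero, List.countP_nil]
    symm
    rw [List.countP_eq_zero]
    intro j hjmem
    have hj : j < s.length := List.mem_range.mp hjmem
    simp only [decide_eq_true_eq, not_and]
    intro hcon
    omega

-- ===== per-sentence equality =====
theorem sentence_eq (w : List Int) (hw : w ≠ []) (s : List Int) :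
    ((PySem.List.pyRange 0 ((s.length : Int) - (w.length : Int) + 1) 1).foldl
      (fun count i => if w = PySem.List.slice s (some i) (some (i + (w.length : Int))) then count + 1 else count) (0 : Int))
    = (s.foldl (pvStepB (pvMasksB w) (1 <<< (w.length - 1))) (0, 0)).1 := by
  have hinv0 : pvInv w 0 [] := by
    intro k
    have hne : ¬ (w.take (k + 1) <:+ ([] : List Int)) := by
      intro h
      have hlen := List.IsSuffix.length_le h
      rw [List.length_take, List.length_nil] at hlen
      have hl : 0 < w.length := List.length_pos_iff.mpr hw
      omega
    simp [hne]
  rw [loopB_count w hw s [] 0 0 hinv0, occAux_countP w s [], zero_add]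
  simp only [List.nil_append]
  rw [PySem.List.pyRange_one, List.foldl_map]
  have hconv : (fun (x : Int) (y : Nat) =>
        if w = PySem.List.slice s (some (0 + (y : Int))) (some (0 + (y : Int) + (w.length : Int)))
        then x + 1 else x)
      = (fun (x : Int) (y : Nat) =>
        if (fun y : Nat => decide (w = (s.drop y).take w.length)) y = true then x + 1 else x) := by
    funext x y
    have hsl : PySem.List.slice s (some (0 + (y : Int))) (some (0 + (y : Int) + (w.length : Int)))
        = (s.drop y).take w.length := by
      rw [PySem.List.slice_toNat s (a := 0 + (y : Int)) (b := 0 + (y : Int) + (w.length : Int))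
        (by omega) (by omega)]
      congr 1
      · omega
      · congr 1
        omega
    rw [hsl]
    simp only [decide_eq_true_eq]
  rw [hconv, PySem.List.foldl_count_if, sub_zero, countP_window_reindex w s hw]
  norm_num
  apply List.countP_congr
  intro j _
  simp only [decide_eq_true_eq]

-- ===== VERDICT (by name: the statement is the Claim_ definition above) =====
theorem count_ngram_spec : Claim_equal_count_ngram := by
  intro w sent _ hpre
  unfold Spec_count_ngram
  rcases sent with _ | ⟨h, t⟩
  · exact absurd rfl hpre
  by_cases hw : w = []
  · subst hw
    simp only [count_ngram, count_ngram_alt, List.length_nil, reduceIte]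
    have hinner : ∀ s : List Int,
        ((PySem.List.pyRange 0 ((s.length : Int) - (((0 : Nat) : Int)) + 1) 1).foldl
          (fun count i => if ([] : List Int) = PySem.List.slice s (some i) (some (i + ((0 : Nat) : Int))) then count + 1 else count) (0 : Int))
        = (s.length : Int) + 1 := by
      intro s
      rw [PySem.List.pyRange_one, List.foldl_map]
      have hconv : (fun (x : Int) (y : Nat) =>
            if ([] : List Int) = PySem.List.slice s (some (0 + (y : Int)))
              (some (0 + (y : Int) + ((0 : Nat) : Int))) then x + 1 else x)
          = (fun (x : Int) (y : Nat) => if (fun _ : Nat => true) y = true then x + 1 else x) := by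
        funext x y
        have hsl : PySem.List.slice s (some (0 + (y : Int)))
            (some (0 + (y : Int) + ((0 : Nat) : Int))) = (s.drop y).take 0 := by
          rw [PySem.List.slice_toNat s (a := 0 + (y : Int)) (b := 0 + (y : Int) + ((0 : Nat) : Int))
            (by omega) (by omega)]
          congr 1
          · omega
          · congr 1
            omega
        rw [hsl]
        simp
      rw [hconv, PySem.List.foldl_count_if]
      simp
    have hfun : (fun (res : Int) (s : List Int) =>
        max ((PySem.List.pyRange 0 ((s.length : Int) - (((0 : Nat) : Int)) + 1) 1).foldl
          (fun count i => if ([] : List Int) = PySem.List.slice s (some i) (some (i + ((0 : Nat) : Int))) then count + 1 else count) (0 : Int)) res)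
        = (fun (res : Int) (s : List Int) => max res ((s.length : Int) + 1)) := by
      funext res s
      rw [hinner s, max_comm]
    refine Eq.trans (congrArg (fun f : Int → List Int → Int => List.foldl f 0 (h :: t)) hfun) ?_
    simp only [List.map_cons]
    show List.foldl (fun res s => max res ((s.length : Int) + 1)) (max 0 ((h.length : Int) + 1)) t
        = List.foldl max ((h.length : Int) + 1) (List.map (fun s => (s.length : Int) + 1) t)
    rw [List.foldl_map, max_eq_right (by positivity)]
  · simp only [count_ngram, count_ngram_alt,
      if_neg (fun h0 => hw (List.length_eq_zero_iff.mp h0))]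
    have hfun : (fun (res : Int) (s : List Int) =>
        max ((PySem.List.pyRange 0 ((s.length : Int) - (w.length : Int) + 1) 1).foldl
          (fun count i => if w = PySem.List.slice s (some i) (some (i + (w.length : Int))) then count + 1 else count) (0 : Int)) res)
        = (fun (best : Int) (s : List Int) =>
            max best (s.foldl (pvStepB (pvMasksB w) (1 <<< (w.length - 1))) (0, 0)).1) := by
      funext res s
      rw [sentence_eq w hw s, max_comm]
    exact congrArg (fun f : Int → List Int → Int => List.foldl f 0 (h :: t)) hfun
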